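-- pv_equiv track=rewrite | github.com/RShibaike/anti_bingo | from_now/アンチビンゴ期待値.py | reach
-- ===== SOURCE A (Python) =====
-- def reach(x,y):
--     #counter変数初期化
--     counter=[]
--     #横列
--     for n in x:
--         if n.count(0)==y:
--             counter+=n
--     #line変数初期化
--     line=[0 for i in range(5)]
--     #縦列
--     for n in range(5):
--         for m in range(5):
--             line[m]=x[m][n]
--         if line.count(0)==y:
--             counter+=line
--     #右斜め列
--     for n in range(5):
--         line[n]=x[n][n]
--     if line.count(0)==y:
--         counter+=line
--     #左斜め列
--     for n in range(5):
--         line[n]=x[4-n][n]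
--     if line.count(0)==y:
--         counter+=line
--     #0削除
--     while 0 in counter:counter.remove(0)
--
--     return counter
-- ===== SOURCE B (Python) =====
-- def reach(x, y):
--     # build all twelve lines first, then filter in one flattening pass
--     lines = list(x)
--     lines += [[x[m][n] for m in range(5)] for n in range(5)]
--     lines.append([x[i][i] for i in range(5)])
--     lines.append([x[4 - i][i] for i in range(5)])
--     return [c for line in lines if line.count(0) == y for c in line if c != 0]
-- ===== Notes on version B (the rewrite author's own statement) =====
-- stated objective: simpler
-- what changed: A interleaves building each line (reusing one mutable 5-cell buffer) with conditional appends and finally strips zeros by repeated list.remove in a while loop; B first materializes all twelve lines as fresh lists and then produces the result in a single flattening filter pass, with no mutable buffer and no post-hoc zero removal.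
import Mathlib
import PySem

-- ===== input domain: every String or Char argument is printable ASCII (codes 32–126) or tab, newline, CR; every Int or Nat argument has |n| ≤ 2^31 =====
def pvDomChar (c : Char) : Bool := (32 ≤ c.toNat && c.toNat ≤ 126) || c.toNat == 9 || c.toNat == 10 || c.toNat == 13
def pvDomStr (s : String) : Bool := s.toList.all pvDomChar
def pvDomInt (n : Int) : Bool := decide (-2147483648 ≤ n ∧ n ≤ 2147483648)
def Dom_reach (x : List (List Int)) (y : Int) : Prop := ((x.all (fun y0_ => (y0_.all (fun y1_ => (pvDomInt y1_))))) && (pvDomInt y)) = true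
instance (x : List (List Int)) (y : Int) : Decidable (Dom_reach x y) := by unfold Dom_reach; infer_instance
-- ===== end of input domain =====

-- B builds all twelve bingo lines up front and emits the answer in one flattening
-- filter pass, instead of A's reused mutable line buffer, interleaved conditional
-- appends and trailing while/remove zero-deletion loop.

-- ===== PORT A =====
-- x[m][n]; total via pyGetD, exact under Pre_reach (all indices used are in range)
def pvCell (x : List (List Int)) (m n : Int) : Int :=
  PySem.List.pyGetD (PySem.List.pyGetD x m []) n 0

-- 'while 0 in counter: counter.remove(0)' — repeated first-occurrence removal
def pvDropZeros (l : List Int) : List Int :=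
  if (0 : Int) ∈ l then
    pvDropZeros ((PySem.List.remove? l 0).getD l)
  else l
termination_by l.length
decreasing_by
  rename_i h
  rw [PySem.List.remove?_eq_some_erase l 0 h]
  simp only [Option.getD_some]
  rw [List.length_erase_of_mem h]
  have := List.length_pos_of_mem h
  omega

def reach (x : List (List Int)) (y : Int) : List Int :=
  let c1 := x.foldl (fun c n => if (PySem.List.count n 0 : Int) = y then c ++ n else c) []
  let line0 : List Int := List.replicate 5 0
  let p := (PySem.List.pyRange 0 5 1).foldl
      (fun (p : List Int × List Int) n =>
        let line := (PySem.List.pyRange 0 5 1).foldl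
            (fun l m => PySem.List.pySetD l m (pvCell x m n)) p.2
        (if (PySem.List.count line 0 : Int) = y then p.1 ++ line else p.1, line))
      (c1, line0)
  let line := (PySem.List.pyRange 0 5 1).foldl
      (fun l n => PySem.List.pySetD l n (pvCell x n n)) p.2
  let c2 := if (PySem.List.count line 0 : Int) = y then p.1 ++ line else p.1
  let line2 := (PySem.List.pyRange 0 5 1).foldl
      (fun l n => PySem.List.pySetD l n (pvCell x (4 - n) n)) line
  let c3 := if (PySem.List.count line2 0 : Int) = y then c2 ++ line2 else c2
  pvDropZeros c3

-- ===== PORT B =====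
def reach_alt (x : List (List Int)) (y : Int) : List Int :=
  let cols := (PySem.List.pyRange 0 5 1).map
      (fun n => (PySem.List.pyRange 0 5 1).map (fun m => pvCell x m n))
  let diag1 := (PySem.List.pyRange 0 5 1).map (fun i => pvCell x i i)
  let diag2 := (PySem.List.pyRange 0 5 1).map (fun i => pvCell x (4 - i) i)
  let lines := (x ++ cols) ++ [diag1, diag2]
  lines.flatMap (fun line =>
    if (PySem.List.count line 0 : Int) = y then line.filter (fun c => c ≠ 0) else [])

-- ===== PRECONDITION & SPEC =====
-- Pre_: the Python A raises IndexError (it reads x[m][n] for m,n in 0..4) unless the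
-- grid has at least 5 rows and each of its first five rows has at least 5 cells.
def Pre_reach (x : List (List Int)) (y : Int) : Prop :=
  5 ≤ x.length ∧ ∀ r ∈ x.take 5, 5 ≤ r.length
instance (x : List (List Int)) (y : Int) : Decidable (Pre_reach x y) := by
  unfold Pre_reach; infer_instance

def pvWitness_reach : List (List Int) × Int :=
  ([[1,2,3,4,5],[0,2,3,4,5],[1,0,3,4,5],[1,2,0,4,5],[1,2,3,0,5]], 1)

def Spec_reach (x : List (List Int)) (y : Int) (out : List Int) : Prop := out = reach_alt x y
instance (x : List (List Int)) (y : Int) (out : List Int) : Decidable (Spec_reach x y out) := by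
  unfold Spec_reach; infer_instance

-- ===== CLAIM (what is proved, stated in full; the proofs are below) =====
def Claim_equal_reach : Prop :=
  ∀ (x : List (List Int)) (y : Int), Dom_reach x y → Pre_reach x y → Spec_reach x y (reach x y)

-- ===== LEMMAS AND PROOFS =====

lemma erase_zero_filter (l : List Int) :
    ((l.erase 0).filter (fun c => c ≠ 0)) = l.filter (fun c => c ≠ 0) := by
  induction l with
  | nil => rfl
  | cons a l ih =>
    by_cases h : a = 0
    · subst h; simp
    · have hb : (a == (0:Int)) = false := by simpa using h
      simp only [List.erase_cons, hb, Bool.false_eq_true, if_false, List.filter_cons, ih]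

lemma pvDropZeros_eq_filter (l : List Int) :
    pvDropZeros l = l.filter (fun c => c ≠ 0) := by
  induction hn : l.length using Nat.strong_induction_on generalizing l with
  | _ n ih =>
    rw [pvDropZeros.eq_def]
    by_cases hm : (0 : Int) ∈ l
    · rw [if_pos hm, PySem.List.remove?_eq_some_erase l 0 hm, Option.getD_some]
      subst hn
      rw [ih (l.erase 0).length
          (by rw [List.length_erase_of_mem hm]; have := List.length_pos_of_mem hm; omega) _ rfl]
      simpa using erase_zero_filter l
    · rw [if_neg hm]
      symm
      exact List.filter_eq_self.mpr (fun a ha => by simp; rintro rfl; exact hm ha)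

lemma foldl_set_line (f : Int → Int) (l : List Int) (h : l.length = 5) :
    ([0,1,2,3,4] : List Int).foldl (fun l m => PySem.List.pySetD l m (f m)) l
      = [f 0, f 1, f 2, f 3, f 4] := by
  match l, h with
  | [a,b,c,d,e], _ => simp [PySem.List.pySetD_of_nonneg, List.set]

def pvColL (x : List (List Int)) (n : Int) : List Int :=
  [pvCell x 0 n, pvCell x 1 n, pvCell x 2 n, pvCell x 3 n, pvCell x 4 n]

lemma col_fold (x : List (List Int)) (y : Int) (idx : List Int) (c l : List Int)
    (hl : l.length = 5) :
    idx.foldl (fun (p : List Int × List Int) n =>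
        let line := ([0,1,2,3,4] : List Int).foldl
            (fun l m => PySem.List.pySetD l m (pvCell x m n)) p.2
        (if (PySem.List.count line 0 : Int) = y then p.1 ++ line else p.1, line)) (c, l)
      = (idx.foldl (fun c n =>
            if (PySem.List.count (pvColL x n) 0 : Int) = y then c ++ pvColL x n else c) c,
         idx.foldl (fun _ n => pvColL x n) l) := by
  induction idx generalizing c l with
  | nil => simp
  | cons i idx ih =>
    rw [List.foldl_cons]
    rw [foldl_set_line (fun m => pvCell x m i) l hl]
    exact ih (if (PySem.List.count (pvColL x i) 0 : Int) = y then c ++ pvColL x i else c)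
      (pvColL x i) rfl

lemma filter_rowfold (x : List (List Int)) (y : Int) (acc : List Int) :
    (x.foldl (fun c n => if (PySem.List.count n 0 : Int) = y then c ++ n else c) acc).filter
        (fun c => c ≠ 0)
      = acc.filter (fun c => c ≠ 0)
        ++ x.flatMap (fun n =>
            if (PySem.List.count n 0 : Int) = y then n.filter (fun c => c ≠ 0) else []) := by
  induction x generalizing acc with
  | nil => simp
  | cons r x ih =>
    simp only [List.foldl_cons, List.flatMap_cons, ih]
    by_cases h : (PySem.List.count r 0 : Int) = y
    all_goals simp only [PySem.List.count_eq] at h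
    · simp [h, List.filter_append]
    · simp [h]

lemma filter_if_append (b : Prop) [Decidable b] (c l : List Int) :
    ((if b then c ++ l else c).filter (fun v => v ≠ 0))
      = c.filter (fun v => v ≠ 0) ++ (if b then l.filter (fun v => v ≠ 0) else []) := by
  split_ifs with h <;> simp [List.filter_append]

-- ===== VERDICT (by name: the statement is the Claim_ definition above) =====
set_option maxHeartbeats 1000000 in
theorem reach_spec : Claim_equal_reach := by
  intro x y _ _
  show reach x y = reach_alt x y
  unfold reach reach_alt
  rw [show PySem.List.pyRange 0 5 1 = ([0,1,2,3,4] : List Int) from rfl]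
  dsimp only
  rw [col_fold x y [0,1,2,3,4] _ (List.replicate 5 0) rfl]
  dsimp only
  rw [show ([0,1,2,3,4] : List Int).foldl (fun _ n => pvColL x n) (List.replicate 5 0)
        = pvColL x 4 from rfl]
  rw [foldl_set_line (fun n => pvCell x n n) (pvColL x 4) rfl]
  rw [foldl_set_line (fun n => pvCell x (4 - n) n) _ rfl]
  rw [pvDropZeros_eq_filter]
  simp only [filter_if_append]
  simp only [List.foldl_cons, List.foldl_nil]
  simp only [filter_if_append]
  rw [filter_rowfold]
  simp only [List.map_cons, List.map_nil, List.flatMap_cons, List.flatMap_append,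
    List.flatMap_nil, pvColL, List.filter_nil, List.append_nil, List.nil_append,
    List.append_assoc]
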